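-- pv_equiv track=rewrite | github.com/cdbeland/moss | word_categorizer.py | letters_introduced_alphabetically
-- ===== SOURCE A (Python) =====
-- def letters_introduced_alphabetically(word):
--     # One of the distinctive characteristics of a rhyme scheme, at
--     # least for the first stanza, is that letters are used in
--     # alphabetical order, left to right, with each letter appearing
--     # for the first time for a line that doesn't rhyme with any
--     # previous lines.
--
--     letters_seen = []
--     for letter in word.lower():
--         if len(letters_seen) == 0:
--             if letter != "a":
--                 return False
--         elif letter in letters_seen:
--             continue
--         elif letter != chr(ord(letters_seen[-1]) + 1):
--             return False
--         letters_seen.append(letter)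
--     return True
-- ===== SOURCE B (Python) =====
-- def letters_introduced_alphabetically(word):
--     # Collect distinct letters in order of first appearance, then check
--     # that this order is exactly the alphabet run starting at 'a'.
--     order = []
--     for letter in word.lower():
--         if letter not in order:
--             order.append(letter)
--     return order == [chr(97 + i) for i in range(len(order))]
-- ===== Notes on version B (the rewrite author's own statement) =====
-- stated objective: simpler
-- what changed: B replaces A's per-character expected-successor state machine with early exits by one pass collecting the distinct letters in first-appearance order, followed by a single comparison of that order against the alphabet run of the same length.
import Mathlib
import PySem

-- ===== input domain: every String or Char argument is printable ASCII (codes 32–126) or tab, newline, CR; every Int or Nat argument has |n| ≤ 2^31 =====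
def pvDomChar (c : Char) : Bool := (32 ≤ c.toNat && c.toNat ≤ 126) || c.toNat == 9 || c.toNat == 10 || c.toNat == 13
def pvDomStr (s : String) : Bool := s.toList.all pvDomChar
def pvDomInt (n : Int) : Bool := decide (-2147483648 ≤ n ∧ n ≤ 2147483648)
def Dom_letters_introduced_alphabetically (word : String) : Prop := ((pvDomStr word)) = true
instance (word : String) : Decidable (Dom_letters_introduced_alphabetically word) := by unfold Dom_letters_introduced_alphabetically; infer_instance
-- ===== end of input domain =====

-- B separates collecting the distinct letters in first-appearance order from
-- validating that this order is the alphabet run from 'a' (objective: simpler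
-- decomposition; A's per-character expected-successor state machine disappears).

-- ===== PORT A =====
-- the for-loop of A: state = letters_seen, early returns become `false`
def pvALoop (seen : List Char) : List Char → Bool
  | [] => true
  | c :: rest =>
    if seen.length == 0 then
      if c != 'a' then false else pvALoop (seen ++ [c]) rest
    else if seen.contains c then pvALoop seen rest
    else if c != Char.ofNat (seen.getLast!.toNat + 1) then false
    else pvALoop (seen ++ [c]) rest

def letters_introduced_alphabetically (word : String) : Bool :=
  pvALoop [] (PySem.Str.lower word).toList

-- ===== PORT B =====
-- Source B's loop: append each letter not yet seen to `order`
def pvBCollect (order : List Char) : List Char → List Char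
  | [] => order
  | c :: rest => if order.contains c then pvBCollect order rest else pvBCollect (order ++ [c]) rest

def letters_introduced_alphabetically_alt (word : String) : Bool :=
  let order := pvBCollect [] (PySem.Str.lower word).toList
  order == (List.range order.length).map (fun i => Char.ofNat (97 + i))

-- ===== PRECONDITION & SPEC =====
def Spec_letters_introduced_alphabetically (word : String) (out : Bool) : Prop := out = letters_introduced_alphabetically_alt word
instance (word : String) (out : Bool) : Decidable (Spec_letters_introduced_alphabetically word out) := by unfold Spec_letters_introduced_alphabetically; infer_instance

-- ===== CLAIM (what is proved, stated in full; the proofs are below) =====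
def Claim_equal_letters_introduced_alphabetically : Prop := ∀ (word : String), Dom_letters_introduced_alphabetically word → Spec_letters_introduced_alphabetically word (letters_introduced_alphabetically word)

-- ===== LEMMAS AND PROOFS =====
-- the alphabet run of length n
def pfx (n : Nat) : List Char := (List.range n).map (fun i => Char.ofNat (97 + i))

lemma pfx_length (n : Nat) : (pfx n).length = n := by simp [pfx]

lemma pfx_succ (n : Nat) : pfx (n + 1) = pfx n ++ [Char.ofNat (97 + n)] := by
  simp [pfx, List.range_succ]

lemma toNat_ofNat_le (m : Nat) (h : m ≤ 127) : (Char.ofNat m).toNat = m := by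
  have hv : Nat.isValidChar m := Or.inl (by omega)
  simp [Char.ofNat, hv, Char.toNat, Char.ofNatAux]

lemma pvBCollect_prefix (chars : List Char) (order : List Char) :
    ∃ t, pvBCollect order chars = order ++ t := by
  induction chars generalizing order with
  | nil => exact ⟨[], by simp [pvBCollect]⟩
  | cons c rest ih =>
    simp only [pvBCollect]
    split
    · exact ih order
    · obtain ⟨t, ht⟩ := ih (order ++ [c])
      exact ⟨c :: t, by simp [ht]⟩

lemma mismatch (n : Nat) (c : Char) (chars : List Char) (hc : c ≠ Char.ofNat (97 + n)) :
    ((pvBCollect (pfx n ++ [c]) chars) ==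
      (List.range (pvBCollect (pfx n ++ [c]) chars).length).map (fun i => Char.ofNat (97 + i))) = false := by
  obtain ⟨t, ht⟩ := pvBCollect_prefix chars (pfx n ++ [c])
  rw [ht, beq_eq_false_iff_ne]
  intro h
  apply hc
  have h1 : ((pfx n ++ [c]) ++ t)[n]? = some c := by
    rw [List.getElem?_append_left (by simp [pfx_length])]
    rw [List.getElem?_append_right (by simp [pfx_length])]
    simp [pfx_length]
  have hlen : n < ((pfx n ++ [c]) ++ t).length := by simp [pfx_length]
  have h2 : ((List.range ((pfx n ++ [c]) ++ t).length).map (fun i => Char.ofNat (97 + i)))[n]? = some (Char.ofNat (97 + n)) := by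
    have hr : (List.range ((pfx n ++ [c]) ++ t).length)[n]? = some n := by simp [pfx_length]
    rw [List.getElem?_map, hr]; rfl
  rw [h] at h1
  rw [h2] at h1
  exact (Option.some.inj h1).symm

lemma main_lemma (chars : List Char) (hd : ∀ c ∈ chars, c.toNat ≤ 126) (n : Nat) (hn : n ≤ 30) :
    pvALoop (pfx n) chars
      = ((pvBCollect (pfx n) chars) ==
          (List.range (pvBCollect (pfx n) chars).length).map (fun i => Char.ofNat (97 + i))) := by
  induction chars generalizing n with
  | nil => simp [pvALoop, pvBCollect, pfx]
  | cons c rest ih =>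
    have hdc : c.toNat ≤ 126 := hd c (by simp)
    have hdr : ∀ x ∈ rest, x.toNat ≤ 126 := fun x hx => hd x (by simp [hx])
    match n with
    | 0 =>
      have hpfx0 : pfx 0 = [] := by simp [pfx]
      by_cases hc : c = 'a'
      · have h1 : pfx 1 = ['a'] := by decide
        simp only [pvALoop, pvBCollect, hpfx0, hc]
        simpa [h1] using ih hdr 1 (by omega)
      · have hca : c ≠ Char.ofNat (97 + 0) := by
          simpa using hc
        simp only [pvALoop, pvBCollect, hpfx0]
        simp only [List.length_nil, List.contains_nil, List.nil_append]
        have hmm := mismatch 0 c rest hca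
        simp only [hpfx0, List.nil_append] at hmm
        have hbne : (c != 'a') = true := by simp [hc]
        simp only [hbne, Bool.false_eq_true, if_false, if_true, hmm]
        simp
    | m + 1 =>
      have hlen : (pfx (m + 1)).length = m + 1 := pfx_length _
      have hlast : (pfx (m + 1)).getLast! = Char.ofNat (97 + m) := by
        rw [pfx_succ]
        simp
      have hsucc : Char.ofNat ((pfx (m + 1)).getLast!.toNat + 1) = Char.ofNat (97 + (m + 1)) := by
        have harith : 97 + m + 1 = 97 + (m + 1) := by omega
        rw [hlast, toNat_ofNat_le (97 + m) (by omega), harith]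
      by_cases hmem : (pfx (m + 1)).contains c
      · simp only [pvALoop, pvBCollect, hlen, hmem]
        simpa using ih hdr (m + 1) hn
      · by_cases hc : c = Char.ofNat (97 + (m + 1))
        · have hgrow : m + 1 ≤ 29 := by
            have : c.toNat = 97 + (m + 1) := by
              rw [hc]; exact toNat_ofNat_le _ (by omega)
            omega
          have happ : pfx (m + 1) ++ [c] = pfx (m + 2) := by
            rw [hc]; exact (pfx_succ (m + 1)).symm
          simp only [pvALoop, pvBCollect, hlen, hmem, hsucc]
          rw [happ]
          have hne : (c != Char.ofNat (97 + (m + 1))) = false := by simp [hc]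
          simp only [hc] at hne ⊢
          simpa using ih hdr (m + 2) (by omega)
        · simp only [pvALoop, pvBCollect, hlen, hmem, hsucc]
          have := mismatch (m + 1) c rest hc
          simp [hc, this]

lemma lower_le_126 (c : Char) (h : pvDomChar c = true) :
    (PySem.Chars.lowerChar c).toNat ≤ 126 := by
  have hc : c.toNat ≤ 126 := by
    simp [pvDomChar] at h
    omega
  unfold PySem.Chars.lowerChar
  split
  · rename_i hu
    simp only [PySem.Chars.isupper, Bool.and_eq_true, decide_eq_true_eq] at hu
    have h2' : c.toNat ≤ 90 := UInt32.le_iff_toNat_le.mp (Char.le_def.mp hu.2)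
    rw [toNat_ofNat_le _ (by omega)]
    omega
  · exact hc

-- ===== VERDICT (by name: the statement is the Claim_ definition above) =====
theorem letters_introduced_alphabetically_spec : Claim_equal_letters_introduced_alphabetically := by
  intro word hdom
  unfold Spec_letters_introduced_alphabetically letters_introduced_alphabetically letters_introduced_alphabetically_alt
  have hp0 : pfx 0 = [] := by simp [pfx]
  rw [← hp0]
  apply main_lemma _ _ 0 (by omega)
  intro c hc
  rw [PySem.Str.toList_lower] at hc
  unfold PySem.Chars.lower at hc
  obtain ⟨d, hd, rfl⟩ := List.mem_map.mp hc
  apply lower_le_126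
  unfold Dom_letters_introduced_alphabetically pvDomStr at hdom
  exact List.all_eq_true.mp hdom d hd
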